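-- pv_equiv track=rewrite | github.com/emmanuelCarron/ITSC | programacion3/eval1/t.py | max_rep
-- ===== SOURCE A (Python) =====
-- def max_rep(items:list)->int:
--     counted = []
--     c = 1
--     item = items[0]
--     for i in range(len(items)-1):
--         if items[i] == items[i+1]:
--             c += 1
--         else:
--             counted.append([item, c])
--             item = items[i+1]
--             c = 1
--
--     counted.sort(key=lambda x:x[1])
--     return (counted[-1][0], counted[-1][1])
-- ===== SOURCE B (Python) =====
-- def max_rep(items):
--     best = None
--     cur, c = items[0], 1
--     for x in items[1:]:
--         if x == cur:
--             c += 1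
--         else:
--             if best is None or c >= best[1]:
--                 best = (cur, c)
--             cur, c = x, 1
--     return best
-- ===== Notes on version B (the rewrite author's own statement) =====
-- stated objective: faster
-- what changed: Instead of building the full run list and sorting it by count to take the last (maximal) entry, B makes one linear pass tracking only the current run and the best run so far (>= tie-break reproduces the stable sort's last-maximum choice), still omitting the final run like A.
import Mathlib
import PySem

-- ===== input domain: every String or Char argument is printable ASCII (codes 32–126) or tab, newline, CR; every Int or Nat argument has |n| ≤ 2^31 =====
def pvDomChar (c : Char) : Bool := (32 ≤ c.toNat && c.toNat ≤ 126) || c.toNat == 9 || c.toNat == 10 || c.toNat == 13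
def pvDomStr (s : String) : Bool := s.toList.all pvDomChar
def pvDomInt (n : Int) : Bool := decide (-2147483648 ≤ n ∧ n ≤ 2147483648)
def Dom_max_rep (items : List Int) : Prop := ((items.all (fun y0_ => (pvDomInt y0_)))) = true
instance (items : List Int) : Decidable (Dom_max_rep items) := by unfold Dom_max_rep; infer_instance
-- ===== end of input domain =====

-- B replaces A's "collect all runs, stable-sort by count, take last" with a single linear
-- pass keeping only the best run so far (>= tie-break), still omitting the final run like A.

-- ===== PORT A =====
-- State of A's loop: (counted, c, item).  items[i]/items[i+1] are ported with pyGetD: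
-- every index the loop touches is in range, so pyGetD is exact there.
def max_rep (items : List Int) : Int × Int :=
  match PySem.List.pyGet?
      (PySem.List.sorted
        (((PySem.List.pyRange 0 ((items.length : Int) - 1) 1).foldl
          (fun (s : List (Int × Int) × Int × Int) i =>
            if PySem.List.pyGetD items i 0 = PySem.List.pyGetD items (i + 1) 0 then
              (s.1, s.2.1 + 1, s.2.2)
            else
              (s.1 ++ [(s.2.2, s.2.1)], 1, PySem.List.pyGetD items (i + 1) 0))
          ([], 1, PySem.List.pyGetD items 0 0)).1)
        (fun p => p.2)) (-1) with
  | some p => p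
  | none => (0, 0)      -- counted[-1] raises IndexError; excluded by Pre_

-- ===== PORT B =====
-- State of B's loop: (best, cur, c).
def max_rep_alt (items : List Int) : Int × Int :=
  match items with
  | [] => (0, 0)        -- items[0] raises IndexError; excluded by Pre_
  | x :: rest =>
    match (rest.foldl
      (fun (s : Option (Int × Int) × Int × Int) y =>
        if y = s.2.1 then (s.1, s.2.1, s.2.2 + 1)
        else
          ((match s.1 with
            | none => some (s.2.1, s.2.2)
            | some b => if s.2.2 ≥ b.2 then some (s.2.1, s.2.2) else some b), y, 1))
      (none, x, 1)).1 with
    | some p => p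
    | none => (0, 0)    -- Python B returns None here (all elements equal); excluded by Pre_

-- ===== PRECONDITION & SPEC =====
-- Pre_ excludes exactly the inputs where A raises IndexError: the empty list
-- (items[0]) and lists whose elements are all equal (counted stays empty, counted[-1]).
def Pre_max_rep (items : List Int) : Prop :=
  items ≠ [] ∧ ¬ (∀ y ∈ items, y = items.headD 0)
instance (items : List Int) : Decidable (Pre_max_rep items) := by unfold Pre_max_rep; infer_instance

def pvWitness_max_rep : List Int := [1, 1, 2]

def Spec_max_rep (items : List Int) (out : Int × Int) : Prop := out = max_rep_alt items
instance (items : List Int) (out : Int × Int) : Decidable (Spec_max_rep items out) := by unfold Spec_max_rep; infer_instance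

-- ===== CLAIM (what is proved, stated in full; the proofs are below) =====
def Claim_equal_max_rep : Prop := ∀ (items : List Int), Dom_max_rep items → Pre_max_rep items → Spec_max_rep items (max_rep items)

-- ===== LEMMAS AND PROOFS =====

-- The completed runs of (x repeated c times) ++ ys, with the final run dropped (as A does).
def pvRuns (x : Int) (c : Int) : List Int → List (Int × Int)
  | [] => []
  | y :: t => if y = x then pvRuns x (c + 1) t else (x, c) :: pvRuns y 1 t

-- B's best-run update and its fold over the run list.
def pvUpd (best : Option (Int × Int)) (p : Int × Int) : Option (Int × Int) :=
  match best with
  | none => some p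
  | some b => if p.2 ≥ b.2 then some p else some b

def pvBestFold (best : Option (Int × Int)) : List (Int × Int) → Option (Int × Int)
  | [] => best
  | p :: t => pvBestFold (pvUpd best p) t

theorem pvRuns_eq_nil_iff (rest : List Int) : ∀ (x c : Int),
    (pvRuns x c rest = [] ↔ ∀ y ∈ rest, y = x) := by
  induction rest with
  | nil => intro x c; simp [pvRuns]
  | cons y t ih =>
    intro x c
    by_cases h : y = x
    · subst h; simp [pvRuns, ih]
    · simp [pvRuns, h]

theorem pvFoldl_range_adjacent {σ : Type} (g : σ → Int → Int → σ) (ys : List Int) :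
    ∀ (n a : Nat) (init : σ), a + n + 1 = ys.length →
    (PySem.List.pyRange (a : Int) ((ys.length : Int) - 1) 1).foldl
        (fun s i => g s (PySem.List.pyGetD ys i 0) (PySem.List.pyGetD ys (i + 1) 0)) init
      = ((ys.drop a).zip (ys.drop (a + 1))).foldl (fun s p => g s p.1 p.2) init := by
  intro n
  induction n with
  | zero =>
    intro a init h
    rw [PySem.List.pyRange_one_eq_nil (by omega)]
    have : ys.drop (a + 1) = [] := by
      apply List.drop_eq_nil_of_le; omega
    simp [this]
  | succ n ih =>
    intro a init h
    rw [PySem.List.pyRange_one_cons (by push_cast; omega)]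
    have ha : a < ys.length := by omega
    have ha1 : a + 1 < ys.length := by omega
    have hd : ys.drop a = ys[a] :: ys.drop (a + 1) := List.drop_eq_getElem_cons ha
    have hd1 : ys.drop (a + 1) = ys[a + 1] :: ys.drop (a + 2) := List.drop_eq_getElem_cons ha1
    have e1 : PySem.List.pyGetD ys (a : Int) 0 = ys[a] := PySem.List.pyGetD_ofNat ys a 0 ha
    have e2 : PySem.List.pyGetD ys ((a : Int) + 1) 0 = ys[a + 1] := by
      have := PySem.List.pyGetD_ofNat ys (a + 1) 0 ha1
      rw [← this]; norm_cast
    rw [List.foldl_cons, e1, e2]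
    have hrec := ih (a + 1) (g init ys[a] ys[a + 1]) (by omega)
    rw [show a + 1 + 1 = a + 2 from rfl, hd1] at hrec
    push_cast at hrec
    rw [hd, hd1]
    simp only [List.zip_cons_cons, List.foldl_cons]
    exact hrec

-- A's loop over adjacent pairs builds acc ++ pvRuns.
theorem pvFoldA_runs (rest : List Int) : ∀ (x c : Int) (acc : List (Int × Int)),
    ((((x :: rest).zip rest).foldl
        (fun (s : List (Int × Int) × Int × Int) p =>
          if p.1 = p.2 then (s.1, s.2.1 + 1, s.2.2)
          else (s.1 ++ [(s.2.2, s.2.1)], 1, p.2)) (acc, c, x)).1)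
      = acc ++ pvRuns x c rest := by
  induction rest with
  | nil => intro x c acc; simp [pvRuns]
  | cons y t ih =>
    intro x c acc
    by_cases h : y = x
    · subst h
      simp only [List.zip_cons_cons, List.foldl_cons, pvRuns, if_pos rfl]
      exact ih y (c + 1) acc
    · have h' : x ≠ y := fun e => h e.symm
      simp only [List.zip_cons_cons, List.foldl_cons, if_neg h', pvRuns, if_neg h]
      rw [ih y 1 (acc ++ [(x, c)])]
      simp

-- B's loop computes pvBestFold over the run list.
theorem pvFoldB_best (rest : List Int) : ∀ (x c : Int) (best : Option (Int × Int)),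
    ((rest.foldl
        (fun (s : Option (Int × Int) × Int × Int) y =>
          if y = s.2.1 then (s.1, s.2.1, s.2.2 + 1)
          else
            ((match s.1 with
              | none => some (s.2.1, s.2.2)
              | some b => if s.2.2 ≥ b.2 then some (s.2.1, s.2.2) else some b), y, 1))
        (best, x, c)).1)
      = pvBestFold best (pvRuns x c rest) := by
  induction rest with
  | nil => intro x c best; simp [pvRuns, pvBestFold]
  | cons y t ih =>
    intro x c best
    by_cases h : y = x
    · subst h
      simp only [List.foldl_cons, pvRuns, if_pos rfl]
      exact ih y (c + 1) best
    · simp only [List.foldl_cons, if_neg h, pvRuns, if_neg h]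
      rw [ih y 1 _]
      rfl

theorem pvGetLast?_cons_ne {α : Type} (a : α) (l : List α) (h : l ≠ []) :
    (a :: l).getLast? = l.getLast? := by
  rw [List.getLast?_cons]
  cases hl : l.getLast? with
  | none => exact absurd (List.getLast?_eq_none_iff.mp hl) h
  | some w => rfl

theorem pvGetLast?_insertBy (x : Int × Int) :
    ∀ (ys : List (Int × Int)), (∃ y ∈ ys, decide (x.2 < y.2) = true) →
    (PySem.List.insertBy (fun a b => decide (a.2 < b.2)) x ys).getLast? = ys.getLast? := by
  intro ys
  induction ys with
  | nil => rintro ⟨y, hy, _⟩; cases hy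
  | cons z t ih =>
    rintro ⟨y, hy, hb⟩
    by_cases hz : decide (x.2 < z.2) = true
    · simp [PySem.List.insertBy, hz]
    · have hyt : y ∈ t := by
        rcases List.mem_cons.mp hy with h | h
        · subst h; exact absurd hb hz
        · exact h
      have ht : t ≠ [] := by rintro rfl; cases hyt
      have hne : PySem.List.insertBy (fun a b => decide (a.2 < b.2)) x t ≠ [] := by
        cases t with
        | nil => simp [PySem.List.insertBy]
        | cons w s =>
          by_cases hw : decide (x.2 < w.2) = true <;> simp [PySem.List.insertBy, hw]
      simp only [PySem.List.insertBy, hz, if_false, Bool.false_eq_true]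
      rw [pvGetLast?_cons_ne z _ hne, ih ⟨y, hyt, hb⟩, pvGetLast?_cons_ne z t ht]

-- Invariant linking the insertion-sort accumulator's last element with pvBestFold's state.
theorem pvLast_sort_best (l : List (Int × Int)) :
    ∀ (acc : List (Int × Int)) (best : Option (Int × Int)),
    ((acc = [] ∧ best = none) ∨
      (∃ m, best = some m ∧ acc.getLast? = some m ∧ ∀ y ∈ acc, y.2 ≤ m.2)) →
    (l.foldl (fun ac x => PySem.List.insertBy (fun a b => decide (a.2 < b.2)) x ac) acc).getLast?
      = pvBestFold best l := by
  induction l with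
  | nil =>
    intro acc best h
    rcases h with ⟨h1, h2⟩ | ⟨m, h1, h2, _⟩
    · subst h1; subst h2; rfl
    · subst h1; simpa [pvBestFold] using h2
  | cons x t ih =>
    intro acc best h
    simp only [List.foldl_cons, pvBestFold]
    rcases h with ⟨h1, h2⟩ | ⟨m, h1, h2, h3⟩
    · subst h1; subst h2
      apply ih
      right
      exact ⟨x, rfl, by simp [PySem.List.insertBy], by simp [PySem.List.insertBy]⟩
    · subst h1
      have hmem : m ∈ acc := List.mem_of_getLast? h2
      by_cases hge : x.2 ≥ m.2
      · have hall : ∀ y ∈ acc, (fun a b : Int × Int => decide (a.2 < b.2)) x y = false := by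
          intro y hy
          simp only [decide_eq_false_iff_not, not_lt]
          exact le_trans (h3 y hy) hge
        rw [PySem.List.insertBy_of_forall_not_before _ _ _ hall]
        apply ih
        right
        refine ⟨x, by simp [pvUpd, hge], by simp, ?_⟩
        intro y hy
        rcases List.mem_append.mp hy with h | h
        · exact le_trans (h3 y h) hge
        · simp at h; subst h; exact le_refl _
      · apply ih
        right
        refine ⟨m, by simp [pvUpd]; omega,
          by rw [pvGetLast?_insertBy x acc ⟨m, hmem, by simp; omega⟩]; exact h2, ?_⟩
        intro y hy
        rcases (PySem.List.mem_insertBy _ _ _ _).mp hy with h | h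
        · subst h; omega
        · exact h3 y h

-- Main: both ports reduce to pvBestFold none over the same nonempty run list.
theorem pvMain (x : Int) (rest : List Int) (h : ¬ ∀ y ∈ rest, y = x) :
    max_rep (x :: rest) = max_rep_alt (x :: rest) := by
  have hruns : pvRuns x 1 rest ≠ [] := by
    intro he; exact h ((pvRuns_eq_nil_iff rest x 1).mp he)
  -- A side
  have hA : max_rep (x :: rest)
      = (match (PySem.List.sorted (pvRuns x 1 rest) (fun p => p.2)).getLast? with
         | some p => p
         | none => (0, 0)) := by
    unfold max_rep
    have hlen : 0 + (rest.length) + 1 = (x :: rest).length := by simp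
    have := pvFoldl_range_adjacent
      (g := fun (s : List (Int × Int) × Int × Int) a b =>
        if a = b then (s.1, s.2.1 + 1, s.2.2)
        else (s.1 ++ [(s.2.2, s.2.1)], 1, b))
      (ys := x :: rest) rest.length 0 ([], 1, PySem.List.pyGetD (x :: rest) 0 0) hlen
    simp only [Nat.cast_zero] at this
    rw [PySem.List.pyGet?_neg_one]
    have hget0 : PySem.List.pyGetD (x :: rest) (0 : Int) 0 = x := by
      simp [PySem.List.pyGetD_zero_cons]
    simp only [hget0] at this ⊢
    have hzip : (x :: rest).drop 0 = x :: rest := rfl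
    have hzip1 : (x :: rest).drop (0 + 1) = rest := rfl
    rw [this, hzip, hzip1, pvFoldA_runs rest x 1 []]
    simp
  -- B side
  have hB : max_rep_alt (x :: rest)
      = (match pvBestFold none (pvRuns x 1 rest) with
         | some p => p
         | none => (0, 0)) := by
    unfold max_rep_alt
    simp only
    rw [pvFoldB_best rest x 1 none]
  rw [hA, hB, PySem.List.sorted_eq_foldl_insertBy,
    pvLast_sort_best (pvRuns x 1 rest) [] none (Or.inl ⟨rfl, rfl⟩)]

-- ===== VERDICT (by name: the statement is the Claim_ definition above) =====
theorem max_rep_spec : Claim_equal_max_rep := by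
  intro items _ hpre
  rcases hpre with ⟨hne, hall⟩
  cases items with
  | nil => exact absurd rfl hne
  | cons x rest =>
    have h : ¬ ∀ y ∈ rest, y = x := by
      intro h'; apply hall
      intro y hy
      rcases List.mem_cons.mp hy with h | h
      · simp [h]
      · simp [h' y h]
    exact pvMain x rest h
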